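-- pv_equiv track=rewrite | github.com/alexpetrovan2001/LeetCodeProblems | Array/PascalTriangle.py | modifyList
-- ===== SOURCE A (Python) =====
-- from typing import List
--
-- def modifyList(listToModify: List[int]) -> List[int]:
--     lengthOfList = len(listToModify)
--     nrAppended = False
--     if lengthOfList % 2 != 0:
--         nrAppended = True
--         listToModify.insert(lengthOfList//2, listToModify[lengthOfList//2])
--         lengthOfList+=1
--     startIndex = lengthOfList // 2 - 1
--     endIndex = lengthOfList // 2
--     if not nrAppended:
--         endIndex = lengthOfList // 2 + 1
--         listToModify.insert(startIndex + 1, listToModify[startIndex + 1] + listToModify[startIndex])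
--         lengthOfList += 1
--     while endIndex < (lengthOfList - 1) and startIndex > 0:
--         listToModify[endIndex] = listToModify[endIndex] + listToModify[endIndex + 1]
--         endIndex += 1
--         listToModify[startIndex] = listToModify[startIndex] + listToModify[startIndex - 1]
--         startIndex -= 1
--     return listToModify
-- ===== SOURCE B (Python) =====
-- from typing import List
--
-- def modifyList(listToModify: List[int]) -> List[int]:
--     # Closed form: result = [first] + neighbouring sums + [last], built in one
--     # forward pass, then written back in place.
--     res = [listToModify[0]]
--     res += [a + b for a, b in zip(listToModify, listToModify[1:])]
--     res.append(listToModify[-1])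
--     listToModify[:] = res
--     return listToModify
-- ===== Notes on version B (the rewrite author's own statement) =====
-- stated objective: simpler
-- what changed: A inserts a middle element and then mutates outward from the center with two index pointers; B computes the whole result directly as [first] + pairwise neighbour sums + [last] in one forward zip pass (no insert, no pointer loop, no case split on parity) and writes it back in place.
import Mathlib
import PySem

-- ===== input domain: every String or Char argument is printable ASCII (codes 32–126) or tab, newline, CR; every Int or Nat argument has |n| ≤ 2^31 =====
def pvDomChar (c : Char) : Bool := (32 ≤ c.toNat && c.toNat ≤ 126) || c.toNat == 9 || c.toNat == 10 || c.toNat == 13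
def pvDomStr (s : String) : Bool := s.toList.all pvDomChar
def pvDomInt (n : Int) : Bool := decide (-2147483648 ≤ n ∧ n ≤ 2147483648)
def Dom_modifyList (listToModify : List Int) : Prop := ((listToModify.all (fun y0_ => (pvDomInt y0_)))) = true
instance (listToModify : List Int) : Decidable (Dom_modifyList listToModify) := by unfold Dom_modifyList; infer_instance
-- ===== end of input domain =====

-- B replaces A's center-outward two-pointer mutation by a one-pass closed form
-- ([first] ++ neighbour sums ++ [last]); objective: simpler. Both mutate the
-- argument in place in Python; the equivalence proved here is about the return value.


-- ===== PORT A =====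
-- while endIndex < lengthOfList - 1 and startIndex > 0: two writes, pointers move outward.
-- fuel = list length bounds the iteration count; the guard is Python's loop condition.
def pvLoopA (xs : List Int) (startIndex endIndex len : Int) : Nat → List Int
  | 0 => xs
  | fuel + 1 =>
    if endIndex < len - 1 ∧ startIndex > 0 then
      let xs1 := PySem.List.pySetD xs endIndex
        (PySem.List.pyGetD xs endIndex 0 + PySem.List.pyGetD xs (endIndex + 1) 0)
      let xs2 := PySem.List.pySetD xs1 startIndex
        (PySem.List.pyGetD xs1 startIndex 0 + PySem.List.pyGetD xs1 (startIndex - 1) 0)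
      pvLoopA xs2 (startIndex - 1) (endIndex + 1) len fuel
    else xs

def modifyList (listToModify : List Int) : List Int :=
  let lengthOfList : Int := (listToModify.length : Int)
  if PySem.Int.mod lengthOfList 2 ≠ 0 then
    -- nrAppended = True branch
    let l1 := PySem.List.insert listToModify (PySem.Int.floordiv lengthOfList 2)
      (PySem.List.pyGetD listToModify (PySem.Int.floordiv lengthOfList 2) 0)
    let len1 := lengthOfList + 1
    let startIndex := PySem.Int.floordiv len1 2 - 1
    let endIndex := PySem.Int.floordiv len1 2
    pvLoopA l1 startIndex endIndex len1 l1.length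
  else
    let startIndex := PySem.Int.floordiv lengthOfList 2 - 1
    let endIndex := PySem.Int.floordiv lengthOfList 2 + 1
    let l1 := PySem.List.insert listToModify (startIndex + 1)
      (PySem.List.pyGetD listToModify (startIndex + 1) 0 + PySem.List.pyGetD listToModify startIndex 0)
    let len1 := lengthOfList + 1
    pvLoopA l1 startIndex endIndex len1 l1.length

-- ===== PORT B =====
def modifyList_alt (listToModify : List Int) : List Int :=
  (PySem.List.pyGetD listToModify 0 0
      :: (listToModify.zip (listToModify.drop 1)).map (fun p => p.1 + p.2))
    ++ [PySem.List.pyGetD listToModify (-1) 0]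

-- ===== PRECONDITION & SPEC =====
-- Both A and B raise IndexError on the empty list; Pre_ excludes exactly that.
def Pre_modifyList (listToModify : List Int) : Prop := listToModify ≠ []
instance (listToModify : List Int) : Decidable (Pre_modifyList listToModify) := by
  unfold Pre_modifyList; infer_instance
def pvWitness_modifyList : List Int := [1, 2, 3]

def Spec_modifyList (listToModify : List Int) (out : List Int) : Prop := out = modifyList_alt listToModify
instance (listToModify : List Int) (out : List Int) : Decidable (Spec_modifyList listToModify out) := by unfold Spec_modifyList; infer_instance

-- ===== CLAIM (what is proved, stated in full; the proofs are below) =====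
def Claim_equal_modifyList : Prop := ∀ (listToModify : List Int), Dom_modifyList listToModify → Pre_modifyList listToModify → Spec_modifyList listToModify (modifyList listToModify)

-- ===== LEMMAS AND PROOFS =====

-- adjacent sums keeping the LAST element: adj [a,b,c] = [a+b, b+c, c]
def pvAdj : List Int → List Int
  | a :: b :: t => (a + b) :: pvAdj (b :: t)
  | l => l

-- pairwise neighbour sums (what B's zip-map computes)
def pvPS : List Int → List Int
  | a :: b :: t => (a + b) :: pvPS (b :: t)
  | _ => []

-- functional model of A's loop on the decomposed state
def pvGo : List Int → List Int → List Int → List Int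
  | c :: d :: ls', acc, a :: b :: rs' =>
      pvGo (d :: ls') ((c + d) :: acc ++ [a + b]) (b :: rs')
  | ls, acc, rs => ls.reverse ++ acc ++ rs

theorem pvPS_zip (xs : List Int) :
    (xs.zip (xs.drop 1)).map (fun p => p.1 + p.2) = pvPS xs := by
  match xs with
  | [] => rfl
  | [a] => rfl
  | a :: b :: t =>
    simp only [List.drop_one, List.tail_cons, List.zip_cons_cons, List.map_cons, pvPS]
    exact congrArg _ (pvPS_zip (b :: t))

theorem pvAdj_eq (v : List Int) (hv : v ≠ []) :
    pvAdj v = pvPS v ++ [v.getLast hv] := by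
  match v with
  | [a] => rfl
  | a :: b :: t =>
    simp only [pvAdj, pvPS, List.cons_append]
    exact congrArg _ (pvAdj_eq (b :: t) (by simp))

theorem pvPS_append_singleton (u : List Int) (a : Int) (hu : u ≠ []) :
    pvPS (u ++ [a]) = pvPS u ++ [u.getLast hu + a] := by
  match u with
  | [c] => rfl
  | c :: d :: t =>
    simp only [List.cons_append, pvPS]
    exact congrArg _ (pvPS_append_singleton (d :: t) a (by simp))

theorem pvPS_reverse (u : List Int) : (pvPS u.reverse).reverse = pvPS u := by
  match u with
  | [] => rfl
  | [a] => rfl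
  | a :: b :: t =>
    rw [show (a :: b :: t).reverse = (b :: t).reverse ++ [a] from by simp,
        pvPS_append_singleton ((b :: t).reverse) a (by simp),
        List.reverse_append, pvPS_reverse (b :: t)]
    simp [pvPS, add_comm]

theorem pvAdj_reverse (u : List Int) (hu : u ≠ []) :
    (pvAdj u.reverse).reverse = u.head hu :: pvPS u := by
  rw [pvAdj_eq u.reverse (by simpa using hu)]
  rw [List.getLast_reverse]
  simp only [List.reverse_append, List.reverse_cons, List.reverse_nil, List.nil_append,
    List.singleton_append]
  rw [pvPS_reverse]

theorem pvPS_split (u : List Int) (x : Int) (v : List Int) :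
    pvPS (u ++ x :: v) = pvPS (u ++ [x]) ++ pvPS (x :: v) := by
  match u with
  | [] => simp [pvPS]
  | [c] => simp [pvPS]
  | c :: d :: t =>
    have ih := pvPS_split (d :: t) x v
    simp only [List.cons_append, pvPS] at ih ⊢
    rw [ih]


theorem pvGetD_append (P t : List Int) (a : Int) :
    PySem.List.pyGetD (P ++ a :: t) ((P.length : Int)) 0 = a := by
  rw [PySem.List.pyGetD_natCast]
  simp [List.getD]

theorem pvGetD_append1 (P t : List Int) (a b : Int) :
    PySem.List.pyGetD (P ++ a :: b :: t) ((P.length : Int) + 1) 0 = b := by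
  have h1 : ((P.length : Int) + 1) = (((P ++ [a]).length : Nat) : Int) := by
    simp
  have h2 : P ++ a :: b :: t = (P ++ [a]) ++ b :: t := by simp
  rw [h1, h2, pvGetD_append]

theorem pvSetD_append (P t : List Int) (a v : Int) :
    PySem.List.pySetD (P ++ a :: t) ((P.length : Int)) v = P ++ v :: t := by
  rw [PySem.List.pySetD_natCast]
  induction P with
  | nil => simp
  | cons h p ih => simp [ih]

-- pvGo computes adjacent sums outward on both halves
theorem pvGo_eq (ls acc rs : List Int) (hls : ls ≠ []) (hrs : rs ≠ [])
    (hlen : ls.length = rs.length) :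
    pvGo ls acc rs = (pvAdj ls).reverse ++ acc ++ pvAdj rs := by
  match ls, rs with
  | [c], [a] => simp [pvGo, pvAdj]
  | [c], a :: b :: t => simp at hlen
  | c :: d :: t, [a] => simp at hlen
  | c :: d :: t, a :: b :: t' =>
    rw [show pvGo (c :: d :: t) acc (a :: b :: t') =
        pvGo (d :: t) ((c + d) :: acc ++ [a + b]) (b :: t') from rfl]
    rw [pvGo_eq (d :: t) ((c + d) :: acc ++ [a + b]) (b :: t') (by simp) (by simp)
        (by simp at hlen ⊢; omega)]
    simp only [pvAdj, List.reverse_cons]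
    simp

theorem pvLoopA_step (xs : List Int) (s e len : Int) (fuel : Nat)
    (h : e < len - 1 ∧ s > 0) :
    pvLoopA xs s e len (fuel + 1) =
      pvLoopA
        (PySem.List.pySetD
          (PySem.List.pySetD xs e (PySem.List.pyGetD xs e 0 + PySem.List.pyGetD xs (e + 1) 0))
          s
          (PySem.List.pyGetD
              (PySem.List.pySetD xs e (PySem.List.pyGetD xs e 0 + PySem.List.pyGetD xs (e + 1) 0)) s 0
            + PySem.List.pyGetD
              (PySem.List.pySetD xs e (PySem.List.pyGetD xs e 0 + PySem.List.pyGetD xs (e + 1) 0)) (s - 1) 0))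
        (s - 1) (e + 1) len fuel := by
  rw [pvLoopA, if_pos h]

-- the loop, on state ls.reverse ++ acc ++ rs (startIndex at last of ls.reverse,
-- endIndex at head of rs), computes pvGo
theorem pvLoopA_eq_go (fuel : Nat) :
    ∀ (ls acc rs : List Int), ls ≠ [] → rs ≠ [] → ls.length = rs.length →
    rs.length ≤ fuel + 1 →
    pvLoopA (ls.reverse ++ acc ++ rs) ((ls.length : Int) - 1)
        ((ls.length : Int) + (acc.length : Int))
        ((ls.length : Int) + (acc.length : Int) + (rs.length : Int)) fuel
      = pvGo ls acc rs := by
  induction fuel with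
  | zero =>
    intro ls acc rs hls hrs hlen hfuel
    match ls, rs with
    | [c], [a] => simp [pvLoopA, pvGo]
    | [c], a :: b :: t => simp at hfuel
    | c :: d :: t, [a] => simp at hlen
    | c :: d :: t, a :: b :: t' =>
      simp at hfuel
  | succ fuel ih =>
    intro ls acc rs hls hrs hlen hfuel
    match ls, rs with
    | [c], [a] =>
      simp [pvLoopA, pvGo]
    | c :: d :: ls', a :: b :: rs' =>
      have step : pvLoopA ((c :: d :: ls').reverse ++ acc ++ (a :: b :: rs'))
          (((c :: d :: ls').length : Int) - 1)
          (((c :: d :: ls').length : Int) + (acc.length : Int))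
          (((c :: d :: ls').length : Int) + (acc.length : Int) + (((a :: b :: rs').length : Int)))
          (fuel + 1) = pvLoopA
            ((d :: ls').reverse ++ ((c + d) :: acc ++ [a + b]) ++ (b :: rs'))
            (((d :: ls').length : Int) - 1)
            (((d :: ls').length : Int) + ((((c + d) :: acc ++ [a + b]).length : Nat) : Int))
            (((d :: ls').length : Int) + ((((c + d) :: acc ++ [a + b]).length : Nat) : Int) + (((b :: rs').length : Int)))
            fuel := by
        rw [pvLoopA_step _ _ _ _ _ (by refine ⟨by simp; omega, by simp⟩)]
        rw [show (c :: d :: ls').reverse ++ acc ++ (a :: b :: rs')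
            = ((c :: d :: ls').reverse ++ acc) ++ a :: b :: rs' from by simp,
          show ((c :: d :: ls').length : Int) + (acc.length : Int)
            = ((((c :: d :: ls').reverse ++ acc).length : Nat) : Int) from by
              simp only [List.length_cons, List.length_append, List.length_reverse]
              push_cast; ring,
          pvGetD_append, pvGetD_append1, pvSetD_append]
        rw [show ((c :: d :: ls').reverse ++ acc) ++ (a + b) :: b :: rs'
            = (d :: ls').reverse ++ c :: (acc ++ (a + b) :: b :: rs') from by simp,
          show ((c :: d :: ls').length : Int) - 1
            = (((d :: ls').reverse.length : Nat) : Int) from by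
              simp only [List.length_cons, List.length_reverse]
              push_cast; ring]
        rw [show ((((d :: ls').reverse.length : Nat) : Int) - 1)
            = ((ls'.reverse.length : Nat) : Int) from by
              simp only [List.length_cons, List.length_reverse]
              push_cast; ring]
        have g2 : PySem.List.pyGetD ((d :: ls').reverse ++ c :: (acc ++ (a + b) :: b :: rs'))
            ((ls'.reverse.length : Nat) : Int) 0 = d := by
          rw [show (d :: ls').reverse ++ c :: (acc ++ (a + b) :: b :: rs')
              = ls'.reverse ++ d :: (c :: (acc ++ (a + b) :: b :: rs')) from by simp]
          exact pvGetD_append _ _ _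
        rw [pvGetD_append, g2, pvSetD_append]
        congr 1 <;>
          first
            | (simp only [List.length_cons, List.length_reverse, List.length_append,
                 List.length_nil]
               push_cast; ring)
            | simp
      rw [step, ih (d :: ls') ((c + d) :: acc ++ [a + b]) (b :: rs') (by simp) (by simp)
          (by simp at hlen ⊢; omega) (by simp at hfuel ⊢; omega)]
      rfl
    | [c], a :: b :: rs' => simp at hlen
    | c :: d :: ls', [a] => simp at hlen

theorem pvAlt_eq (xs : List Int) (h : xs ≠ []) :
    modifyList_alt xs = xs.head h :: pvPS xs ++ [xs.getLast h] := by
  cases xs with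
  | nil => exact absurd rfl h
  | cons a t =>
    unfold modifyList_alt
    rw [pvPS_zip]
    simp [PySem.List.pyGetD_zero_cons, PySem.List.pyGetD_neg_one]

theorem pvA_odd (u v : List Int) (x : Int) (hlen : u.length = v.length) :
    modifyList (u ++ x :: v) = modifyList_alt (u ++ x :: v) := by
  have hm : (u ++ x :: v).length = 2 * u.length + 1 := by simp; omega
  simp only [modifyList]
  rw [if_pos (show PySem.Int.mod ((u ++ x :: v).length : Int) 2 ≠ 0 from by
    rw [PySem.Int.mod_eq_emod_of_pos (by norm_num), hm]; push_cast; omega)]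
  rw [PySem.Int.floordiv_eq_ediv_of_pos (by norm_num),
    show (((u ++ x :: v).length : Int)) / 2 = ((u.length : Nat) : Int) from by
      rw [hm]; push_cast; omega,
    pvGetD_append,
    PySem.List.insert_natCast _ _ _ (by simp),
    List.take_left, List.drop_left]
  rw [PySem.Int.floordiv_eq_ediv_of_pos (by norm_num),
    show (((u ++ x :: v).length : Int) + 1) / 2 = (((u.length + 1 : Nat)) : Int) from by
      rw [hm]; push_cast; omega]
  have hloop : pvLoopA (u ++ x :: x :: v) (((u.length + 1 : Nat) : Int) - 1)
      ((u.length + 1 : Nat) : Int) (((u ++ x :: v).length : Int) + 1)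
      ((u ++ x :: x :: v).length)
      = pvGo ((u ++ [x]).reverse) [] (x :: v) := by
    rw [← pvLoopA_eq_go ((u ++ x :: x :: v).length) ((u ++ [x]).reverse) [] (x :: v)
      (by simp) (by simp) (by simp [hlen]) (by simp; omega)]
    congr 1 <;>
      first
        | (simp only [List.length_cons, List.length_reverse, List.length_append,
             List.length_nil]
           push_cast; omega)
        | simp
  rw [hloop]
  rw [pvGo_eq _ _ _ (by simp) (by simp) (by simp [hlen])]
  rw [pvAdj_reverse (u ++ [x]) (by simp), pvAdj_eq (x :: v) (by simp)]
  rw [pvAlt_eq _ (by simp), pvPS_split u x v]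
  cases u with
  | nil => simp
  | cons h t => simp

theorem pvA_even (u v : List Int) (hu : u ≠ []) (hv : v ≠ []) (hlen : u.length = v.length) :
    modifyList (u ++ v) = modifyList_alt (u ++ v) := by
  match v with
  | vh :: vt =>
  have hm : (u ++ vh :: vt).length = 2 * u.length := by simp at hlen ⊢; omega
  simp only [modifyList]
  rw [if_neg (show ¬ PySem.Int.mod ((u ++ vh :: vt).length : Int) 2 ≠ 0 from by
    rw [PySem.Int.mod_eq_emod_of_pos (by norm_num), hm]; push_cast; omega)]
  rw [PySem.Int.floordiv_eq_ediv_of_pos (by norm_num),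
    show (((u ++ vh :: vt).length : Int)) / 2 = ((u.length : Nat) : Int) from by
      rw [hm]; push_cast; omega]
  rw [show ((u.length : Nat) : Int) - 1 + 1 = ((u.length : Nat) : Int) from by ring]
  rw [pvGetD_append]
  have hge : u.length ≥ 1 := by cases u with | nil => exact absurd rfl hu | cons a t => simp
  have g2 : PySem.List.pyGetD (u ++ vh :: vt) (((u.length : Nat) : Int) - 1) 0
      = u.getLast hu := by
    rw [show ((u.length : Nat) : Int) - 1 = ((u.dropLast.length : Nat) : Int) from by
        simp only [List.length_dropLast]; omega,
      show u ++ vh :: vt = u.dropLast ++ (u.getLast hu) :: (vh :: vt) from by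
        conv_lhs => rw [← List.dropLast_append_getLast hu]
        simp]
    exact pvGetD_append _ _ _
  rw [g2, PySem.List.insert_natCast _ _ _ (by simp), List.take_left, List.drop_left]
  have hloop : pvLoopA (u ++ (vh + u.getLast hu) :: vh :: vt) (((u.length : Nat) : Int) - 1)
      (((u.length : Nat) : Int) + 1) (((u ++ vh :: vt).length : Int) + 1)
      ((u ++ (vh + u.getLast hu) :: vh :: vt).length)
      = pvGo u.reverse [vh + u.getLast hu] (vh :: vt) := by
    rw [← pvLoopA_eq_go ((u ++ (vh + u.getLast hu) :: vh :: vt).length) u.reverse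
      [vh + u.getLast hu] (vh :: vt)
      (by simpa using hu) (by simp) (by simp at hlen ⊢; omega) (by simp; omega)]
    congr 1 <;>
      first
        | (simp only [List.length_cons, List.length_reverse, List.length_append,
             List.length_nil]
           push_cast; omega)
        | simp
  rw [hloop]
  rw [pvGo_eq _ _ _ (by simpa using hu) (by simp) (by simp at hlen ⊢; omega)]
  rw [pvAdj_reverse u hu, pvAdj_eq (vh :: vt) (by simp)]
  rw [pvAlt_eq _ (by simp [hu]), pvPS_split u vh vt, pvPS_append_singleton u vh hu]
  match u with
  | uh :: ut => simp [add_comm]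

theorem modifyList_spec : Claim_equal_modifyList := by
  intro xs _ hne
  unfold Spec_modifyList
  rcases Nat.even_or_odd xs.length with ⟨m, hm⟩ | ⟨m, hm⟩
  · -- even length, m ≥ 1
    have hm1 : 1 ≤ m := by
      cases xs with
      | nil => exact absurd rfl hne
      | cons a t => simp at hm; omega
    rw [show xs = xs.take m ++ xs.drop m from (List.take_append_drop _ _).symm]
    exact pvA_even _ _
      (List.ne_nil_of_length_pos (by simp [List.length_take]; omega))
      (List.ne_nil_of_length_pos (by simp [List.length_drop]; omega))
      (by simp [List.length_take, List.length_drop]; omega)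
  · -- odd length
    cases hdp : xs.drop m with
    | nil =>
      exfalso
      have := congrArg List.length hdp
      simp [List.length_drop] at this; omega
    | cons x v =>
      rw [show xs = xs.take m ++ x :: v from by
        conv_lhs => rw [← List.take_append_drop m xs]
        rw [hdp]]
      have hvl : v.length = m := by
        have := congrArg List.length hdp
        simp [List.length_drop] at this; omega
      exact pvA_odd _ _ _ (by simp [List.length_take, hvl]; omega)
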